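-- pv_equiv track=rewrite | github.com/ckdals3121/Programmers | solutions/LEVEL2/마법의 엘리베이터/main.py | solution
-- ===== SOURCE A (Python) =====
-- def solution(storey):
--     answer = 0
--
--     while storey != 0 :
--         mod = storey % 10
--
--         if mod > 5 :
--             answer += (10 - mod)
--             storey += 10
--         elif mod < 5 :
--             answer += (mod)
--         else :
--             if (storey // 10) % 10 >= 5 :
--                 storey += 10
--             answer += mod
--
--         storey //= 10
--
--     return answer
-- ===== SOURCE B (Python) =====
-- def solution(storey):
--     if storey < 10:
--         return min(storey, 11 - storey)
--     d = storey % 10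
--     return min(d + solution(storey // 10), (10 - d) + solution(storey // 10 + 1))
-- ===== Notes on version B (the rewrite author's own statement) =====
-- stated objective: idiomatic
-- what changed: Replaced A's greedy while-loop with digit-5 lookahead tie-breaking by a direct recursion that takes the min of the two choices (press down d, or press up 10-d with a carry), with a closed-form base case below ten.
-- outside the precondition, e.g. on solution(-1): A returns 1, B returns -1
import Mathlib
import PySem

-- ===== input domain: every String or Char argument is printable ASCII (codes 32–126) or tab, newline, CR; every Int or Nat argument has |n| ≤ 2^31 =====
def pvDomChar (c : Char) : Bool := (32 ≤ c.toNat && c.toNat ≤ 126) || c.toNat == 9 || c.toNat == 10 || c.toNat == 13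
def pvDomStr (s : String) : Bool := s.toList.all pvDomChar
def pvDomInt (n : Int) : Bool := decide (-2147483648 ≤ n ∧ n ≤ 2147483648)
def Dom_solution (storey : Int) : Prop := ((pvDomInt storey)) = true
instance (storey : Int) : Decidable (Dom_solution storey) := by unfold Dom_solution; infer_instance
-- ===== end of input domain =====

-- B replaces A's greedy loop (with its digit-5 lookahead) by a two-choice min recursion (alternative/idiomatic; same cost class).

-- ===== PORT A =====
-- A's while loop; the fuel argument only totalizes it (storey.natAbs + 1 always exceeds the
-- number of iterations, since each iteration strictly shrinks |storey|)
def solutionGo : Nat → Int → Int → Int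
  | 0, _, answer => answer
  | fuel + 1, storey, answer =>
    if storey = 0 then answer
    else
      let mod := PySem.Int.mod storey 10
      if mod > 5 then
        solutionGo fuel (PySem.Int.floordiv (storey + 10) 10) (answer + (10 - mod))
      else if mod < 5 then
        solutionGo fuel (PySem.Int.floordiv storey 10) (answer + mod)
      else if PySem.Int.mod (PySem.Int.floordiv storey 10) 10 ≥ 5 then
        solutionGo fuel (PySem.Int.floordiv (storey + 10) 10) (answer + mod)
      else
        solutionGo fuel (PySem.Int.floordiv storey 10) (answer + mod)

def solution (storey : Int) : Int := solutionGo (storey.natAbs + 1) storey 0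

-- ===== PORT B =====
-- B's recursion; the fuel argument only totalizes it (storey.toNat + 1 always exceeds the
-- recursion depth, which is bounded by the number of digits)
def solutionAltGo : Nat → Int → Int
  | 0, _ => 0
  | fuel + 1, storey =>
    if storey < 10 then min storey (11 - storey)
    else
      let d := PySem.Int.mod storey 10
      min (d + solutionAltGo fuel (PySem.Int.floordiv storey 10))
          ((10 - d) + solutionAltGo fuel (PySem.Int.floordiv storey 10 + 1))

def solution_alt (storey : Int) : Int := solutionAltGo (storey.toNat + 1) storey

-- ===== PRECONDITION & SPEC =====
-- Pre_ restricts to the problem's natural domain, non-negative storey (the puzzle's floors are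
-- positive); on negative input neither program computes anything meaningful and they disagree.
def Pre_solution (storey : Int) : Prop := 0 ≤ storey
instance (storey : Int) : Decidable (Pre_solution storey) := by unfold Pre_solution; infer_instance
def pvWitness_solution : Int := (2554)

def Spec_solution (storey : Int) (out : Int) : Prop := out = solution_alt storey
instance (storey : Int) (out : Int) : Decidable (Spec_solution storey out) := by unfold Spec_solution; infer_instance

-- ===== CLAIM (what is proved, stated in full; the proofs are below) =====
def Claim_equal_solution : Prop := ∀ (storey : Int), Dom_solution storey → Pre_solution storey → Spec_solution storey (solution storey)

-- ===== LEMMAS AND PROOFS =====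

-- Nat version of A's per-step answer increment, used only in proofs
def F (n : Nat) : Int :=
  if n = 0 then 0
  else
    if 5 < n % 10 then (10 - ((n % 10 : Nat) : Int)) + F (n / 10 + 1)
    else if n % 10 < 5 then ((n % 10 : Nat) : Int) + F (n / 10)
    else if 5 ≤ (n / 10) % 10 then 5 + F (n / 10 + 1)
    else 5 + F (n / 10)
  termination_by n
  decreasing_by all_goals omega

-- Nat version of B's recursion
def G (n : Nat) : Int :=
  if n < 10 then min (n : Int) (11 - (n : Int))
  else
    min (((n % 10 : Nat) : Int) + G (n / 10))
        ((10 - ((n % 10 : Nat) : Int)) + G (n / 10 + 1))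
  termination_by n
  decreasing_by all_goals omega

theorem F_step (n : Nat) :
    (5 ≤ n % 10 → F (n + 1) ≤ F n ∧ F n ≤ F (n + 1) + 1) ∧
    (n % 10 < 5 → F n ≤ F (n + 1) ∧ F (n + 1) ≤ F n + 1) := by
  induction n using Nat.strong_induction_on with
  | _ n ih =>
    have F0 : F 0 = 0 := by rw [F.eq_def]; norm_num
    have F1 : F 1 = 1 := by rw [F.eq_def]; norm_num [F0]
    rcases Nat.lt_or_ge n 1 with h0 | h0
    · interval_cases n
      rw [F.eq_def 1, F.eq_def 0]; norm_num [F0]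
    by_cases h9 : n % 10 = 9
    · -- carry: (n+1)%10 = 0, (n+1)/10 = n/10 + 1
      have e1 : (n + 1) % 10 = 0 := by omega
      have e2 : (n + 1) / 10 = n / 10 + 1 := by omega
      rw [F.eq_def (n + 1), F.eq_def n]
      simp only [e1, e2, h9]
      rw [if_neg (by omega : ¬ n + 1 = 0), if_neg (by omega : ¬ n = 0)]
      norm_num
      omega
    · have e2 : (n + 1) / 10 = n / 10 := by omega
      have ihq := ih (n / 10) (by omega)
      rw [F.eq_def (n + 1), F.eq_def n]
      have e1 : (n + 1) % 10 = n % 10 + 1 := by omega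
      simp only [e1, e2]
      rcases Nat.lt_or_ge ((n / 10) % 10) 5 with hq5 | hq5
      · obtain ⟨i1, i2⟩ := ihq.2 hq5
        split_ifs <;> push_cast <;> (try exact ‹False›.elim) <;> omega
      · obtain ⟨i1, i2⟩ := ihq.1 hq5
        split_ifs <;> push_cast <;> (try exact ‹False›.elim) <;> omega

theorem F_eq_G (n : Nat) : F n = G n := by
  induction n using Nat.strong_induction_on with
  | _ n ih =>
    rcases Nat.lt_or_ge n 10 with h10 | h10
    · have F0 : F 0 = 0 := by rw [F.eq_def]; norm_num
      have F1 : F 1 = 1 := by rw [F.eq_def]; norm_num [F0]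
      interval_cases n <;>
        · rw [F.eq_def, G.eq_def]; norm_num [F0, F1]
    · rw [F.eq_def n, G.eq_def n]
      have hn0 : ¬ n = 0 := by omega
      have hn10 : ¬ n < 10 := by omega
      simp only [hn0, hn10, if_false]
      rw [← ih (n / 10) (by omega), ← ih (n / 10 + 1) (by omega)]
      have step := F_step (n / 10)
      have hb : F (n / 10) - 1 ≤ F (n / 10 + 1) ∧ F (n / 10 + 1) ≤ F (n / 10) + 1 := by
        rcases Nat.lt_or_ge ((n / 10) % 10) 5 with h | h
        · have := step.2 h; omega
        · have := step.1 h; omega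
      rcases Nat.lt_or_ge (n % 10) 5 with hd | hd
      · have h1 : ¬ 5 < n % 10 := by omega
        simp only [h1, hd, if_true, if_false]
        push_cast; omega
      rcases Nat.eq_or_lt_of_le hd with hd5 | hd6
      · have h1 : ¬ 5 < n % 10 := by omega
        have h2 : ¬ n % 10 < 5 := by omega
        simp only [h1, h2, if_false]
        rcases Nat.lt_or_ge ((n / 10) % 10) 5 with hq5 | hq5
        · have h3 : ¬ 5 ≤ (n / 10) % 10 := by omega
          have := step.2 hq5
          simp only [h3, if_false]
          push_cast [← hd5]; omega
        · have := step.1 hq5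
          simp only [hq5, if_true]
          push_cast [← hd5]; omega
      · simp only [hd6, if_true]
        push_cast; omega

-- bridge: A's loop on a non-negative Int computes answer + F (any sufficient fuel)
theorem solutionGo_eq : ∀ (fuel n : Nat) (answer : Int), n < fuel →
    solutionGo fuel (n : Int) answer = answer + F n := by
  intro fuel
  induction fuel with
  | zero => intro n answer h; exact absurd h (Nat.not_lt_zero n)
  | succ f ih =>
    intro n answer hf
    have e3 : ∀ m : Nat, PySem.Int.mod (m : Int) 10 = ((m % 10 : Nat) : Int) := by
      intro m; rw [PySem.Int.mod_eq_emod_of_pos (by omega)]; omega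
    have e1 : PySem.Int.floordiv (n : Int) 10 = ((n / 10 : Nat) : Int) := by
      rw [PySem.Int.floordiv_eq_ediv_of_pos (by omega)]; omega
    have e2 : PySem.Int.floordiv ((n : Int) + 10) 10 = ((n / 10 + 1 : Nat) : Int) := by
      rw [PySem.Int.floordiv_eq_ediv_of_pos (by omega)]; omega
    rw [solutionGo, F.eq_def]
    simp only [e1, e2, e3]
    by_cases h0 : n = 0
    · simp [h0]
    rw [if_neg (show ¬ ((n : Nat) : Int) = 0 by exact_mod_cast h0), if_neg h0]
    rcases Nat.lt_or_ge 5 (n % 10) with h5 | h5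
    · rw [if_pos (show ((n % 10 : Nat) : Int) > 5 by exact_mod_cast h5), if_pos h5,
          ih (n / 10 + 1) _ (by omega)]
      push_cast; ring
    rcases Nat.lt_or_ge (n % 10) 5 with h5' | h5''
    · rw [if_neg (show ¬ ((n % 10 : Nat) : Int) > 5 by push_cast; omega),
          if_pos (show ((n % 10 : Nat) : Int) < 5 by exact_mod_cast h5'),
          if_neg (show ¬ 5 < n % 10 by omega), if_pos h5', ih (n / 10) _ (by omega)]
      push_cast; ring
    · have hd5 : n % 10 = 5 := by omega
      rw [if_neg (show ¬ ((n % 10 : Nat) : Int) > 5 by push_cast; omega),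
          if_neg (show ¬ ((n % 10 : Nat) : Int) < 5 by push_cast; omega),
          if_neg (show ¬ 5 < n % 10 by omega), if_neg (show ¬ n % 10 < 5 by omega)]
      by_cases hq : 5 ≤ (n / 10) % 10
      · have hn : 50 ≤ n := by omega
        rw [if_pos (show ((n / 10 % 10 : Nat) : Int) ≥ 5 by exact_mod_cast hq), if_pos hq,
            ih (n / 10 + 1) _ (by omega)]
        push_cast [hd5]; ring
      · rw [if_neg (show ¬ ((n / 10 % 10 : Nat) : Int) ≥ 5 by push_cast; omega), if_neg hq,
            ih (n / 10) _ (by omega)]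
        push_cast [hd5]; ring

theorem solutionAltGo_eq : ∀ (fuel n : Nat), n < fuel →
    solutionAltGo fuel (n : Int) = G n := by
  intro fuel
  induction fuel with
  | zero => intro n h; exact absurd h (Nat.not_lt_zero n)
  | succ f ih =>
    intro n hf
    have e1 : PySem.Int.floordiv (n : Int) 10 = ((n / 10 : Nat) : Int) := by
      rw [PySem.Int.floordiv_eq_ediv_of_pos (by omega)]; omega
    have e3 : PySem.Int.mod (n : Int) 10 = ((n % 10 : Nat) : Int) := by
      rw [PySem.Int.mod_eq_emod_of_pos (by omega)]; omega
    rw [solutionAltGo, G.eq_def]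
    simp only [e1, e3]
    by_cases h10 : n < 10
    · rw [if_pos (by exact_mod_cast h10), if_pos h10]
    · rw [if_neg (by exact_mod_cast h10), if_neg h10, ih (n / 10) (by omega),
          show ((n / 10 : Nat) : Int) + 1 = ((n / 10 + 1 : Nat) : Int) by push_cast; ring,
          ih (n / 10 + 1) (by omega)]

-- ===== VERDICT (by name: the statement is the Claim_ definition above) =====
theorem solution_spec : Claim_equal_solution := by
  intro storey _ hpre
  have h0 : 0 ≤ storey := hpre
  unfold Spec_solution
  obtain ⟨n, rfl⟩ : ∃ m : Nat, storey = (m : Int) := ⟨storey.toNat, by omega⟩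
  rw [solution, solution_alt,
      show ((n : Int).natAbs) = n from Int.natAbs_natCast n,
      show ((n : Int).toNat) = n from Int.toNat_natCast n,
      solutionGo_eq (n + 1) n 0 (by omega), solutionAltGo_eq (n + 1) n (by omega), F_eq_G]
  ring
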